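-- pv_equiv track=rewrite | github.com/C3EQUALZz/DSTU_VKB | programming_methods/laboratories/first_laboratory/112527.py | find_best_broadcast
-- ===== SOURCE A (Python) =====
-- from itertools import combinations
-- from typing import List, Tuple
--
-- def get_max_indices(times: List[int]) -> Tuple[List[int], int]:
--     """Возвращает индексы максимальных значений в списке."""
--     max_value = max(times)
--     return [i for i, value in enumerate(times) if value == max_value], max_value
--
-- def find_best_broadcast(times: List[int], k: int) -> int:
--     """Находит наилучшие моменты для трансляции рекламы."""
--     max_indices, max_1 = get_max_indices(times)
--
--     # Проверяем, можно ли транслировать два ролика в максимальные моменты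
--     for i, j in combinations(max_indices, 2):
--         if abs(i - j) > k - 1:
--             return max_1 * 2
--
--     # Если не удалось, ищем второй максимальный момент
--     max_2 = max((times[i] for ind in max_indices for i in range(len(times))
--                  if i != ind and abs(ind - i) > k - 1), default=0)
--
--     if max_2 > 0:
--         return max_1 + max_2
--
--     # Если не нашли подходящие моменты, ищем альтернативный вариант
--     max_sum = 0
--     n = len(times)
--     for i in range(n - k):
--         edge = i + k
--         if edge < n:
--             j = max(times[edge:n])
--             s = times[i] + j
--             max_sum = max(max_sum, s)
--
--     return max_sum
-- ===== SOURCE B (Python) =====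
-- def find_best_broadcast(times, k):
--     """Находит наилучшие моменты для трансляции рекламы (first/last max index + interval maxima)."""
--     max_1 = max(times)
--     n = len(times)
--     first = times.index(max_1)
--     last = n - 1 - times[::-1].index(max_1)
--     # two maximal moments far enough apart?
--     if first != last and last - first > k - 1:
--         return 2 * max_1
--     # best second moment compatible with some maximal moment: a prefix and a suffix of indices
--     if k > 0:
--         max_2 = max(0, max(times[:max(last - k + 1, 0)], default=0),
--                     max(times[first + k:], default=0))
--     else:
--         # no early return and k <= 0 force first == last: every other index qualifies
--         max_2 = max(0, max(times[:first], default=0), max(times[first + 1:], default=0))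
--     if max_2 > 0:
--         return max_1 + max_2
--     # fallback: best times[i] + max(times[i+k:]) via precomputed suffix maxima
--     suf = [0] * n
--     m = None
--     for i in range(n - 1, -1, -1):
--         m = times[i] if m is None else max(m, times[i])
--         suf[i] = m
--     best = 0
--     for i in range(n):
--         e = i + k
--         if 0 <= e < n:
--             best = max(best, times[i] + suf[e])
--     return best
-- ===== Notes on version B (the rewrite author's own statement) =====
-- stated objective: faster
-- what changed: Replaces the pairwise scan over all pairs of max indices by a first/last-max-index distance check, the double generator for the second maximum by two C-level interval (prefix/suffix) maxima, and the quadratic slice-max fallback loop by a precomputed suffix-maxima array.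
import Mathlib
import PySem

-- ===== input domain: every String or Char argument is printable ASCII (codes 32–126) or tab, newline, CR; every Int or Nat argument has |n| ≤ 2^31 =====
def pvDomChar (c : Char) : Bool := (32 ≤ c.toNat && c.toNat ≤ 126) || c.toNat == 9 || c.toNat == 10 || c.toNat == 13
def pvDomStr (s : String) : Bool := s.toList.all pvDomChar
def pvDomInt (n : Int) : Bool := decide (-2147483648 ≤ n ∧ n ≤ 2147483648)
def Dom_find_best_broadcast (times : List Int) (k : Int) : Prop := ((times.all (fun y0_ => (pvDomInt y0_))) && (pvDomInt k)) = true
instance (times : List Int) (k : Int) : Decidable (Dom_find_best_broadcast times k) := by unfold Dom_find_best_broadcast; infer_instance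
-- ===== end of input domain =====

-- B replaces A's pairwise scan over max indices by a first/last-max-index distance check, the
-- double-generator second maximum by prefix/suffix interval maxima, and the quadratic slice-max
-- fallback by a precomputed suffix-maxima array.

-- ===== PORT A =====
def get_max_indices (times : List Int) : List Int × Int :=
  match PySem.List.max? times (fun x => x) with
  | none => ([], 0)   -- Python max([]) raises ValueError; excluded by Pre_
  | some max_value =>
    (((PySem.List.enumerate times).filter (fun p => p.2 == max_value)).map (fun p => p.1), max_value)

def find_best_broadcast (times : List Int) (k : Int) : Int :=
  let mi := get_max_indices times
  let max_indices := mi.1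
  let max_1 := mi.2
  -- for i, j in combinations(max_indices, 2): if abs(i - j) > k - 1: return max_1 * 2
  if (PySem.List.combinations max_indices 2).any (fun c =>
      match c with
      | [i, j] => decide (|i - j| > k - 1)
      | _ => false) then
    max_1 * 2
  else
    let n : Int := times.length
    -- every i drawn from range(len(times)) is in range, so the pyGetD default is never used
    let cands := max_indices.flatMap (fun ind =>
      (PySem.List.pyRange 0 n).filterMap (fun i =>
        if i ≠ ind ∧ |ind - i| > k - 1 then some (PySem.List.pyGetD times i 0) else none))
    let max_2 := (PySem.List.max? cands (fun x => x)).getD 0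
    if max_2 > 0 then max_1 + max_2
    else
      (PySem.List.pyRange 0 (n - k)).foldl (fun max_sum i =>
        let edge := i + k
        if edge < n then
          -- max(times[edge:n]): the slice is nonempty whenever 0 ≤ edge < n (inside Pre_); Python max raises on empty
          let j := (PySem.List.max? (PySem.List.slice times (some edge) (some n)) (fun x => x)).getD 0
          max max_sum (PySem.List.pyGetD times i 0 + j)
        else max_sum) 0

-- ===== PORT B =====
-- suffix maxima, built back-to-front (B's backward index loop)
def sufMaxes (times : List Int) : List Int :=
  times.foldr (fun v acc =>
    match acc with
    | [] => [v]
    | m :: _ => max v m :: acc) []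

def find_best_broadcast_alt (times : List Int) (k : Int) : Int :=
  match PySem.List.max? times (fun x => x) with
  | none => 0   -- Python max([]) raises ValueError; excluded by Pre_
  | some max_1 =>
    let n : Int := times.length
    let first : Int := ((PySem.List.index? times max_1).getD 0 : Nat)
    let last : Int := n - 1 -
      (((PySem.List.index? ((PySem.List.slice? times none none (-1)).getD []) max_1).getD 0 : Nat) : Int)
    if first ≠ last ∧ last - first > k - 1 then 2 * max_1
    else
      -- the qualifying second moments form a prefix and a suffix of the index range
      let max_2 :=
        if k > 0 then
          max (max 0 ((PySem.List.max? (PySem.List.slice times none (some (max (last - k + 1) 0))) (fun x => x)).getD 0))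
              ((PySem.List.max? (PySem.List.slice times (some (first + k)) none) (fun x => x)).getD 0)
        else
          -- no early return and k ≤ 0 force first == last: every other index qualifies
          max (max 0 ((PySem.List.max? (PySem.List.slice times none (some first)) (fun x => x)).getD 0))
              ((PySem.List.max? (PySem.List.slice times (some (first + 1)) none) (fun x => x)).getD 0)
      if max_2 > 0 then max_1 + max_2
      else
        let suf := sufMaxes times
        (PySem.List.pyRange 0 n).foldl (fun best i =>
          let e := i + k
          if 0 ≤ e ∧ e < n then max best (PySem.List.pyGetD times i 0 + PySem.List.pyGetD suf e 0)
          else best) 0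

-- ===== PRECONDITION & SPEC =====
-- Pre_ excludes exactly the inputs on which A raises: the empty list (max([]) is a ValueError), and
-- k < 0 with a unique maximum and all other values ≤ 0, where A's fallback loop evaluates times[i] with i ≥ len(times).
def Pre_find_best_broadcast (times : List Int) (k : Int) : Prop :=
  times ≠ [] ∧ (0 ≤ k ∨
    ¬ (times.count ((PySem.List.max? times (fun x => x)).getD 0) = 1 ∧
       ∀ x ∈ times, x ≠ (PySem.List.max? times (fun x => x)).getD 0 → x ≤ 0))
instance (times : List Int) (k : Int) : Decidable (Pre_find_best_broadcast times k) := by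
  unfold Pre_find_best_broadcast; infer_instance

def pvWitness_find_best_broadcast : List Int × Int := ([3, 1, 3], 2)

def Spec_find_best_broadcast (times : List Int) (k : Int) (out : Int) : Prop := out = find_best_broadcast_alt times k
instance (times : List Int) (k : Int) (out : Int) : Decidable (Spec_find_best_broadcast times k out) := by unfold Spec_find_best_broadcast; infer_instance

-- ===== CLAIM (what is proved, stated in full; the proofs are below) =====
def Claim_equal_find_best_broadcast : Prop := ∀ (times : List Int) (k : Int), Dom_find_best_broadcast times k → Pre_find_best_broadcast times k → Spec_find_best_broadcast times k (find_best_broadcast times k)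

-- ===== LEMMAS AND PROOFS =====

-- Python's max(l, default=0)
def mxOf (l : List Int) : Int := (PySem.List.max? l (fun x => x)).getD 0

-- A's inner qualification: index j can be paired with some maximal moment
def QA (S : List Int) (k : Int) (j : Int) : Prop := ∃ ind ∈ S, j ≠ ind ∧ |ind - j| > k - 1

theorem enum_mem (ts : List Int) (s : Int) (p : Int × Int) :
    p ∈ PySem.List.enumerate ts s ↔ ∃ j : Nat, ∃ h : j < ts.length, p.1 = s + j ∧ p.2 = ts[j] := by
  induction ts generalizing s with
  | nil => simp [PySem.List.enumerate]
  | cons x xs ih =>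
    rw [PySem.List.enumerate_cons]
    simp only [List.mem_cons, ih]
    constructor
    · rintro (rfl | ⟨j, hj, h1, h2⟩)
      · exact ⟨0, by simp, by simp, by simp⟩
      · exact ⟨j + 1, by simpa using hj, by push_cast; omega, by simpa using h2⟩
    · rintro ⟨j, hj, h1, h2⟩
      cases j with
      | zero =>
        left
        obtain ⟨a, b⟩ := p
        simp at h1 h2 ⊢
        exact ⟨by omega, h2⟩
      | succ j' =>
        right
        exact ⟨j', by simpa using hj, by push_cast at h1 ⊢; omega, by simpa using h2⟩

theorem enum_pairwise (ts : List Int) (s : Int) :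
    (PySem.List.enumerate ts s).Pairwise (fun p q => p.1 < q.1) := by
  induction ts generalizing s with
  | nil => simp [PySem.List.enumerate]
  | cons x xs ih =>
    rw [PySem.List.enumerate_cons]
    refine List.Pairwise.cons ?_ (ih (s + 1))
    intro q hq
    obtain ⟨j, hj, h1, _⟩ := (enum_mem xs (s+1) q).1 hq
    omega

theorem enum_filter_count (ts : List Int) (s : Int) (m : Int) :
    ((PySem.List.enumerate ts s).filter (fun p => p.2 == m)).length = ts.count m := by
  induction ts generalizing s with
  | nil => simp [PySem.List.enumerate]
  | cons x xs ih =>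
    rw [PySem.List.enumerate_cons]
    by_cases hx : x = m
    · simp [hx, ih]
    · simp [hx, ih]

theorem mxOf_def (l : List Int) : (PySem.List.max? l (fun x => x)).getD 0 = mxOf l := rfl

theorem mxOf_ub (l : List Int) : ∀ x ∈ l, x ≤ mxOf l := by
  intro x hx
  cases hmc : PySem.List.max? l (fun y => y) with
  | none =>
    rw [(PySem.List.max?_eq_none_iff _ _).1 hmc] at hx
    simp at hx
  | some w =>
    have := PySem.List.max?_isMax hmc x hx
    simpa [mxOf, hmc] using this

theorem mxOf_mem (l : List Int) : mxOf l = 0 ∨ mxOf l ∈ l := by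
  cases hmc : PySem.List.max? l (fun y => y) with
  | none => left; simp [mxOf, hmc]
  | some w => right; simpa [mxOf, hmc] using PySem.List.max?_mem hmc

theorem mem_take_iff (l : List Int) (t : Nat) (x : Int) :
    x ∈ l.take t ↔ ∃ j : Nat, ∃ hj : j < l.length, j < t ∧ l[j] = x := by
  constructor
  · intro hx
    obtain ⟨i, hi, hgi⟩ := List.mem_iff_getElem.1 hx
    have hlen : i < l.length ∧ i < t := by
      have := hi
      rw [List.length_take] at this
      omega
    refine ⟨i, hlen.1, hlen.2, ?_⟩
    rw [← hgi, List.getElem_take]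
  · rintro ⟨j, hj, hjt, rfl⟩
    apply List.mem_iff_getElem.2
    refine ⟨j, by rw [List.length_take]; omega, ?_⟩
    rw [List.getElem_take]

theorem mem_drop_iff (l : List Int) (t : Nat) (x : Int) :
    x ∈ l.drop t ↔ ∃ j : Nat, ∃ hj : j < l.length, t ≤ j ∧ l[j] = x := by
  constructor
  · intro hx
    obtain ⟨i, hi, hgi⟩ := List.mem_iff_getElem.1 hx
    have hlen : t + i < l.length := by
      have := hi
      rw [List.length_drop] at this
      omega
    refine ⟨t + i, hlen, by omega, ?_⟩
    rw [← hgi, List.getElem_drop]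
  · rintro ⟨j, hj, hjt, rfl⟩
    apply List.mem_iff_getElem.2
    refine ⟨j - t, by rw [List.length_drop]; omega, ?_⟩
    rw [List.getElem_drop]
    congr 1
    omega

theorem pair_sublist_of_pairwise_lt {l : List Int} {a b : Int}
    (hpw : l.Pairwise (· < ·)) (ha : a ∈ l) (hb : b ∈ l) (hab : a < b) :
    [a, b].Sublist l := by
  induction l with
  | nil => simp at ha
  | cons x t ih =>
    rcases List.mem_cons.1 ha with rfl | hat
    · have hbt : b ∈ t := by
        rcases List.mem_cons.1 hb with rfl | h
        · omega
        · exact h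
      exact (List.singleton_sublist.2 hbt).cons₂ a
    · have hbt : b ∈ t := by
        rcases List.mem_cons.1 hb with rfl | h
        · have := (List.pairwise_cons.1 hpw).1 a hat
          omega
        · exact h
      exact (ih (List.pairwise_cons.1 hpw).2 hat hbt).cons x

theorem length_eq_one_of_pairwise_lt {l : List Int} {a : Int}
    (hpw : l.Pairwise (· < ·)) (ha : a ∈ l) (hall : ∀ i ∈ l, i = a) : l.length = 1 := by
  cases l with
  | nil => simp at ha
  | cons x t =>
    cases t with
    | nil => rfl
    | cons y u =>
      have hx := hall x (by simp)
      have hy := hall y (by simp)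
      have := (List.pairwise_cons.1 hpw).1 y (by simp)
      omega

theorem sufMaxes_len (ts : List Int) : (sufMaxes ts).length = ts.length := by
  induction ts with
  | nil => rfl
  | cons x xs ih =>
    show (match sufMaxes xs with
      | [] => [x]
      | m :: _ => max x m :: sufMaxes xs).length = xs.length + 1
    cases h : sufMaxes xs with
    | nil => simp_all
    | cons m rest => simp_all

theorem sufMaxes_get (ts : List Int) (j : Nat) (h : j < ts.length) :
    (sufMaxes ts)[j]? = some (mxOf (ts.drop j)) := by
  induction ts generalizing j with
  | nil => simp at h
  | cons x xs ih =>
    show (match sufMaxes xs with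
      | [] => [x]
      | m :: _ => max x m :: sufMaxes xs)[j]? = _
    cases hs : sufMaxes xs with
    | nil =>
      have hxs : xs = [] := by
        have := sufMaxes_len xs
        rw [hs] at this
        exact List.eq_nil_of_length_eq_zero this.symm
      subst hxs
      have hj0 : j = 0 := by simp at h; omega
      subst hj0
      simp [mxOf, PySem.List.max?_id_cons]
    | cons m rest =>
      have hxs : xs ≠ [] := by
        intro hh; rw [hh] at hs; simp [sufMaxes] at hs
      obtain ⟨y, t, rfl⟩ := List.exists_cons_of_ne_nil hxs
      cases j with
      | zero =>
        have h0 := ih 0 (by simp)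
        rw [hs] at h0
        simp only [List.drop_zero] at h0
        simp only [List.getElem?_cons_zero] at h0 ⊢
        have hm : m = mxOf (y :: t) := by simpa using h0
        simp only [List.drop_zero, mxOf, PySem.List.max?_id_cons] at hm ⊢
        simp at hm ⊢
        rw [hm]
        exact (List.foldl_assoc).symm
      | succ j' =>
        have h' := ih j' (by simpa using h)
        rw [hs] at h'
        simpa using h'

-- ===== VERDICT (by name: the statement is the Claim_ definition above) =====
theorem find_best_broadcast_spec : Claim_equal_find_best_broadcast := by
  unfold Claim_equal_find_best_broadcast
  intro ts k hdom hpre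
  unfold Spec_find_best_broadcast
  obtain ⟨hne, hk⟩ := hpre
  obtain ⟨m, hm⟩ : ∃ m, PySem.List.max? ts (fun x => x) = some m := by
    cases h : PySem.List.max? ts (fun x => x) with
    | none => exact absurd ((PySem.List.max?_eq_none_iff _ _).1 h) hne
    | some m => exact ⟨m, rfl⟩
  have hmmem : m ∈ ts := PySem.List.max?_mem hm
  obtain ⟨fN, hfN⟩ : ∃ fN, PySem.List.index? ts m = some fN := by
    cases h : PySem.List.index? ts m with
    | none => rw [PySem.List.index?_eq_none_iff] at h; exact absurd hmmem h
    | some v => exact ⟨v, rfl⟩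
  obtain ⟨rN, hrN⟩ : ∃ rN, PySem.List.index? ts.reverse m = some rN := by
    cases h : PySem.List.index? ts.reverse m with
    | none => rw [PySem.List.index?_eq_none_iff] at h; exact absurd (List.mem_reverse.2 hmmem) h
    | some v => exact ⟨v, rfl⟩
  simp only [find_best_broadcast, find_best_broadcast_alt, get_max_indices, hm,
    PySem.List.slice?_none_none_neg_one, Option.getD_some, hfN, hrN]
  -- abbreviations
  obtain ⟨hfLt, hfVal, hfMin⟩ := PySem.List.getElem_of_index?_eq_some hfN
  obtain ⟨hrLt', hrVal, hrMin⟩ := PySem.List.getElem_of_index?_eq_some hrN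
  have hrLt : rN < ts.length := by simpa using hrLt'
  have hLcast : (((ts.length - 1 - rN : Nat)) : Int) = (ts.length : Int) - 1 - (rN : Int) := by
    have h0 : 0 < ts.length := List.length_pos_of_ne_nil hne
    omega
  rw [← hLcast]
  set S := List.map (fun p => p.1) (List.filter (fun p => p.2 == m) (PySem.List.enumerate ts)) with hS
  set LN : Nat := ts.length - 1 - rN with hLN
  set F : Int := ((fN : Nat) : Int) with hF
  set L : Int := ((LN : Nat) : Int) with hL
  -- index properties of first / last maximal position
  have hLVal : ts[LN]'(by omega) = m := by
    have := hrVal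
    rw [List.getElem_reverse] at this
    simpa [hLN] using this
  have hLMax : ∀ j (hj : j < ts.length), LN < j → ts[j] ≠ m := by
    intro j hj hLj hjm
    have hidx : ts.length - 1 - j < rN := by omega
    have := hrMin (ts.length - 1 - j) (by omega)
    rw [List.getElem_reverse] at this
    apply this
    have hrw : ts.length - 1 - (ts.length - 1 - j) = j := by omega
    simp only [hrw]  -- careful: getElem proof-irrelevant, indices must match
    exact hjm
  -- membership in S
  have hmemS : ∀ i : Int, i ∈ S ↔ ∃ j : Nat, ∃ hj : j < ts.length, i = (j : Int) ∧ ts[j] = m := by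
    intro i
    rw [hS]
    simp only [List.mem_map, List.mem_filter]
    constructor
    · rintro ⟨p, ⟨hpe, hpm⟩, rfl⟩
      obtain ⟨j, hj, h1, h2⟩ := (enum_mem ts 0 p).1 hpe
      refine ⟨j, hj, by omega, ?_⟩
      rw [← h2]
      simpa using hpm
    · rintro ⟨j, hj, rfl, hval⟩
      refine ⟨((j : Int), ts[j]), ⟨?_, by simp [hval]⟩, rfl⟩
      exact (enum_mem ts 0 _).2 ⟨j, hj, by simp, rfl⟩
  have hSpw : S.Pairwise (· < ·) := by
    rw [hS]
    exact List.Pairwise.map _ (fun p q h => h) (List.Pairwise.filter _ (enum_pairwise ts 0))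
  have hFmem : F ∈ S := (hmemS F).2 ⟨fN, hfLt, rfl, hfVal⟩
  have hLmem : L ∈ S := (hmemS L).2 ⟨LN, by omega, rfl, hLVal⟩
  have hFle : ∀ i ∈ S, F ≤ i := by
    intro i hi
    obtain ⟨j, hj, rfl, hval⟩ := (hmemS i).1 hi
    by_contra hlt
    exact hfMin j (by omega) hval
  have hLge : ∀ i ∈ S, i ≤ L := by
    intro i hi
    obtain ⟨j, hj, rfl, hval⟩ := (hmemS i).1 hi
    by_contra hlt
    exact hLMax j hj (by omega) hval
  have hFL : F ≤ L := hFle L hLmem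
  -- stage 1: the pairwise scan fires iff the extreme max indices are k apart
  have hany : (((PySem.List.combinations S 2).any fun c =>
      match c with
      | [i, j] => decide (|i - j| > k - 1)
      | _ => false) = true) ↔ (F ≠ L ∧ L - F > k - 1) := by
    rw [List.any_eq_true]
    constructor
    · rintro ⟨c, hc, hgc⟩
      obtain ⟨hsub, hlen⟩ := (PySem.List.mem_combinations_iff _ _ _).1 hc
      match c, hlen with
      | [i, j], _ =>
        simp only [decide_eq_true_eq] at hgc
        have hij : i < j := by
          have := hSpw.sublist hsub
          simpa using this
        have h1 := hFle i (hsub.subset (by simp))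
        have h2 := hLge j (hsub.subset (by simp))
        have habs : |i - j| = j - i := by rw [abs_sub_comm]; exact abs_of_nonneg (by omega)
        constructor
        · omega
        · omega
    · rintro ⟨hFL', hgt⟩
      refine ⟨[F, L], (PySem.List.mem_combinations_iff _ _ _).2
        ⟨pair_sublist_of_pairwise_lt hSpw hFmem hLmem (by omega), rfl⟩, ?_⟩
      simp only [decide_eq_true_eq]
      have habs : |F - L| = L - F := by rw [abs_sub_comm]; exact abs_of_nonneg (by omega)
      omega
  by_cases hc1 : F ≠ L ∧ L - F > k - 1
  · rw [if_pos (hany.2 hc1), if_pos hc1]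
    ring
  rw [if_neg (fun h => hc1 (hany.1 h)), if_neg hc1]
  -- stage 2
  set cands := List.flatMap
      (fun ind => List.filterMap
        (fun i => if i ≠ ind ∧ |ind - i| > k - 1 then some (PySem.List.pyGetD ts i 0) else none)
        (PySem.List.pyRange 0 (ts.length : Int))) S with hcands
  have hcand : ∀ v : Int, v ∈ cands ↔ ∃ j : Nat, ∃ hj : j < ts.length, QA S k j ∧ v = ts[j] := by
    intro v
    rw [hcands, List.mem_flatMap]
    constructor
    · rintro ⟨ind, hind, hv⟩
      rw [List.mem_filterMap] at hv
      obtain ⟨i, hi, hvi⟩ := hv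
      rw [PySem.List.mem_pyRange_one] at hi
      obtain ⟨h0i, h1i⟩ := hi
      split_ifs at hvi with hcnd
      · simp only [Option.some.injEq] at hvi
        refine ⟨i.toNat, by omega, ⟨ind, hind, ?_, ?_⟩, ?_⟩
        · rw [Int.toNat_of_nonneg h0i]; exact hcnd.1
        · rw [Int.toNat_of_nonneg h0i]; exact hcnd.2
        · rw [← hvi, PySem.List.pyGetD_of_nonneg _ _ h0i, List.getD_eq_getElem?_getD,
            List.getElem?_eq_getElem (by omega)]
          rfl
    · rintro ⟨j, hj, ⟨ind, hind, hne', habs⟩, rfl⟩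
      refine ⟨ind, hind, ?_⟩
      rw [List.mem_filterMap]
      refine ⟨(j : Int), ?_, ?_⟩
      · rw [PySem.List.mem_pyRange_one]
        constructor
        · positivity
        · exact_mod_cast hj
      · rw [if_pos ⟨hne', habs⟩, PySem.List.pyGetD_of_nonneg _ _ (by positivity),
          Int.toNat_natCast, List.getD_eq_getElem?_getD, List.getElem?_eq_getElem hj]
        rfl
  -- qualification is the same seen from first/last only
  have hqq : ∀ j : Nat, j < ts.length →
      (QA S k j ↔ (((j:Int) ≠ F ∧ |F - (j:Int)| > k - 1) ∨ ((j:Int) ≠ L ∧ |L - (j:Int)| > k - 1))) := by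
    intro j hj
    constructor
    · rintro ⟨ind, hind, hne', habs⟩
      have h1 := hFle ind hind
      have h2 := hLge ind hind
      by_cases hle : ind ≤ (j : Int)
      · left
        have habs' : |ind - (j:Int)| = (j:Int) - ind := by
          rw [abs_sub_comm]; exact abs_of_nonneg (by omega)
        have habsF : |F - (j:Int)| = (j:Int) - F := by
          rw [abs_sub_comm]; exact abs_of_nonneg (by omega)
        constructor
        · omega
        · omega
      · right
        have hlt : (j : Int) < ind := by omega
        have habs' : |ind - (j:Int)| = ind - (j:Int) := abs_of_nonneg (by omega)
        have habsL : |L - (j:Int)| = L - (j:Int) := abs_of_nonneg (by omega)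
        constructor
        · omega
        · omega
    · rintro (⟨h1, h2⟩ | ⟨h1, h2⟩)
      · exact ⟨F, hFmem, fun h => h1 h, by rwa [abs_sub_comm] at h2 ⊢⟩
      · exact ⟨L, hLmem, fun h => h1 h, by rwa [abs_sub_comm] at h2 ⊢⟩
  set MA := (PySem.List.max? cands (fun x => x)).getD 0 with hMA
  set MB := (if k > 0 then
      max (max 0 ((PySem.List.max? (PySem.List.slice ts none (some (max (L - k + 1) 0))) (fun x => x)).getD 0))
          ((PySem.List.max? (PySem.List.slice ts (some (F + k)) none) (fun x => x)).getD 0)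
    else
      max (max 0 ((PySem.List.max? (PySem.List.slice ts none (some F)) (fun x => x)).getD 0))
          ((PySem.List.max? (PySem.List.slice ts (some (F + 1)) none) (fun x => x)).getD 0)) with hMB
  have hF0 : (0:Int) ≤ F := by rw [hF]; positivity
  have hMB0 : 0 ≤ MB := by
    rw [hMB]
    split_ifs <;> exact le_max_of_le_left (le_max_left 0 _)
  have hMBub : ∀ j (hj : j < ts.length), QA S k (j:Int) → ts[j] ≤ MB := by
    intro j hj hq
    have hd := (hqq j hj).1 hq
    rw [hMB]
    split_ifs with hk1
    · rw [PySem.List.slice_to _ (le_max_right _ _), PySem.List.slice_from _ (by omega),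
        mxOf_def, mxOf_def]
      have hcase : (j:Int) ≤ L - k ∨ F + k ≤ (j:Int) := by
        rcases hd with ⟨h1, h2⟩ | ⟨h1, h2⟩
        · rcases abs_cases (F - (j:Int)) with ⟨ha, _⟩ | ⟨ha, _⟩ <;> omega
        · rcases abs_cases (L - (j:Int)) with ⟨ha, _⟩ | ⟨ha, _⟩ <;> omega
      rcases hcase with hc | hc
      · have hmem : ts[j] ∈ List.take (max (L - k + 1) 0).toNat ts :=
          (mem_take_iff _ _ _).2 ⟨j, hj, by omega, rfl⟩
        exact le_max_of_le_left (le_trans (mxOf_ub _ _ hmem) (le_max_right 0 _))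
      · have hmem : ts[j] ∈ List.drop (F + k).toNat ts :=
          (mem_drop_iff _ _ _).2 ⟨j, hj, by omega, rfl⟩
        exact le_max_of_le_right (mxOf_ub _ _ hmem)
    · rw [PySem.List.slice_to _ hF0, PySem.List.slice_from _ (by omega), mxOf_def, mxOf_def]
      have hjF : (j:Int) ≠ F := by
        rcases hd with ⟨h1, _⟩ | ⟨h1, _⟩
        · exact h1
        · have hFLeq : F = L := by
            by_contra hx
            exact hc1 ⟨hx, by omega⟩
          rw [hFLeq]
          exact h1
      rcases lt_or_gt_of_ne hjF with hc | hc
      · have hmem : ts[j] ∈ List.take F.toNat ts :=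
          (mem_take_iff _ _ _).2 ⟨j, hj, by omega, rfl⟩
        exact le_max_of_le_left (le_trans (mxOf_ub _ _ hmem) (le_max_right 0 _))
      · have hmem : ts[j] ∈ List.drop (F + 1).toNat ts :=
          (mem_drop_iff _ _ _).2 ⟨j, hj, by omega, rfl⟩
        exact le_max_of_le_right (mxOf_ub _ _ hmem)
  have hMBmem : MB = 0 ∨ ∃ j : Nat, ∃ hj : j < ts.length, QA S k (j:Int) ∧ MB = ts[j] := by
    rw [hMB]
    split_ifs with hk1
    · rw [PySem.List.slice_to _ (le_max_right _ _), PySem.List.slice_from _ (by omega),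
        mxOf_def, mxOf_def]
      rcases max_cases (max 0 (mxOf (List.take (max (L - k + 1) 0).toNat ts)))
        (mxOf (List.drop (F + k).toNat ts)) with ⟨he, _⟩ | ⟨he, _⟩
      · rw [he]
        rcases max_cases 0 (mxOf (List.take (max (L - k + 1) 0).toNat ts)) with ⟨he2, _⟩ | ⟨he2, _⟩
        · rw [he2]; exact Or.inl rfl
        · rw [he2]
          rcases mxOf_mem (List.take (max (L - k + 1) 0).toNat ts) with hz | hmem
          · exact Or.inl hz
          · obtain ⟨j, hj, hjt, hv⟩ := (mem_take_iff _ _ _).1 hmem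
            refine Or.inr ⟨j, hj, ?_, hv.symm⟩
            refine (hqq j hj).2 (Or.inr ⟨by omega, ?_⟩)
            rw [abs_of_nonneg (by omega : (0:Int) ≤ L - (j:Int))]
            omega
      · rw [he]
        rcases mxOf_mem (List.drop (F + k).toNat ts) with hz | hmem
        · exact Or.inl hz
        · obtain ⟨j, hj, hjt, hv⟩ := (mem_drop_iff _ _ _).1 hmem
          refine Or.inr ⟨j, hj, ?_, hv.symm⟩
          refine (hqq j hj).2 (Or.inl ⟨by omega, ?_⟩)
          rw [abs_sub_comm, abs_of_nonneg (by omega : (0:Int) ≤ (j:Int) - F)]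
          omega
    · rw [PySem.List.slice_to _ hF0, PySem.List.slice_from _ (by omega), mxOf_def, mxOf_def]
      rcases max_cases (max 0 (mxOf (List.take F.toNat ts))) (mxOf (List.drop (F + 1).toNat ts)) with
        ⟨he, _⟩ | ⟨he, _⟩
      · rw [he]
        rcases max_cases 0 (mxOf (List.take F.toNat ts)) with ⟨he2, _⟩ | ⟨he2, _⟩
        · rw [he2]; exact Or.inl rfl
        · rw [he2]
          rcases mxOf_mem (List.take F.toNat ts) with hz | hmem
          · exact Or.inl hz
          · obtain ⟨j, hj, hjt, hv⟩ := (mem_take_iff _ _ _).1 hmem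
            refine Or.inr ⟨j, hj, ?_, hv.symm⟩
            refine (hqq j hj).2 (Or.inl ⟨by omega, ?_⟩)
            have := abs_nonneg (F - (j:Int))
            omega
      · rw [he]
        rcases mxOf_mem (List.drop (F + 1).toNat ts) with hz | hmem
        · exact Or.inl hz
        · obtain ⟨j, hj, hjt, hv⟩ := (mem_drop_iff _ _ _).1 hmem
          refine Or.inr ⟨j, hj, ?_, hv.symm⟩
          refine (hqq j hj).2 (Or.inl ⟨by omega, ?_⟩)
          have := abs_nonneg (F - (j:Int))
          omega
  have hMAub : ∀ j (hj : j < ts.length), QA S k (j:Int) → ts[j] ≤ MA := by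
    intro j hj hq
    have hmem : ts[j] ∈ cands := (hcand _).2 ⟨j, hj, hq, rfl⟩
    cases hmc : PySem.List.max? cands (fun x => x) with
    | none =>
      rw [(PySem.List.max?_eq_none_iff _ _).1 hmc] at hmem
      simp at hmem
    | some w =>
      have hle := PySem.List.max?_isMax hmc ts[j] hmem
      rw [hMA, hmc]
      simpa using hle
  have hMAmem : MA = 0 ∨ ∃ j : Nat, ∃ hj : j < ts.length, QA S k (j:Int) ∧ MA = ts[j] := by
    cases hmc : PySem.List.max? cands (fun x => x) with
    | none => left; rw [hMA, hmc]; rfl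
    | some w =>
      right
      have hw : w ∈ cands := PySem.List.max?_mem hmc
      obtain ⟨j, hj, hq, hv⟩ := (hcand w).1 hw
      exact ⟨j, hj, hq, by rw [hMA, hmc, Option.getD_some, hv]⟩
  have hMBMA : MB = max 0 MA := by
    apply le_antisymm
    · rcases hMBmem with h | ⟨j, hj, hq, h⟩
      · simp [h]
      · rw [h]; exact le_max_of_le_right (hMAub j hj hq)
    · rcases hMAmem with h | ⟨j, hj, hq, h⟩
      · simp [h, hMB0]
      · exact max_le hMB0 (h ▸ hMBub j hj hq)
  by_cases hpos : MA > 0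
  · have hMBeq : MB = MA := by rw [hMBMA]; exact max_eq_right hpos.le
    rw [if_pos hpos, if_pos (hMBeq ▸ hpos), hMBeq]
  · have hMBz : MB = 0 := by rw [hMBMA]; exact max_eq_left (by omega)
    rw [if_neg hpos, if_neg (by rw [hMBz]; omega)]
    -- stage 3
    have hsmall : ∀ j (hj : j < ts.length), QA S k (j:Int) → ts[j] ≤ 0 := fun j hj hq =>
      le_trans (hMAub j hj hq) (by omega)
    have hk0 : 0 ≤ k := by
      by_contra hkneg
      push Not at hkneg
      have hFLeq : F = L := by
        by_contra hneq
        exact hc1 ⟨hneq, by omega⟩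
      have hcount : ts.count m = 1 := by
        have hcnt : ts.count m = S.length := by
          rw [hS, List.length_map]
          exact (enum_filter_count ts 0 m).symm
        have hall : ∀ i ∈ S, i = F := fun i hi =>
          le_antisymm (hFLeq ▸ hLge i hi) (hFle i hi)
        rw [hcnt]
        exact length_eq_one_of_pairwise_lt hSpw hFmem hall
      have hothers : ∀ x ∈ ts, x ≠ m → x ≤ 0 := by
        intro x hx hxm
        obtain ⟨j, hj, rfl⟩ := List.mem_iff_getElem.1 hx
        apply hsmall j hj
        refine ⟨F, hFmem, ?_, by have := abs_nonneg (F - (j:Int)); omega⟩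
        intro hh
        have hjf : j = fN := by rw [hF] at hh; exact_mod_cast hh
        apply hxm
        subst hjf
        exact hfVal
      rcases hk with h | h
      · omega
      · rw [hm] at h
        simp only [Option.getD_some] at h
        exact h ⟨hcount, hothers⟩
    have hjval : ∀ e : Int, 0 ≤ e → e < (ts.length : Int) →
        (PySem.List.max? (PySem.List.slice ts (some e) (some (ts.length : Int))) (fun x => x)).getD 0
        = PySem.List.pyGetD (sufMaxes ts) e 0 := by
      intro e he hen
      rw [PySem.List.slice_toNat ts he (by positivity)]
      have htake : List.take (((ts.length : Int)).toNat - e.toNat) (List.drop e.toNat ts)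
          = List.drop e.toNat ts := by
        apply List.take_of_length_le
        rw [List.length_drop]
        omega
      rw [htake, PySem.List.pyGetD_of_nonneg _ _ he, List.getD_eq_getElem?_getD,
        sufMaxes_get ts e.toNat (by omega), Option.getD_some]
      rfl
    by_cases hnk : (ts.length : Int) - k ≤ 0
    · rw [PySem.List.pyRange_one_eq_nil hnk, List.foldl_nil]
      refine Eq.symm ?_
      refine (PySem.List.foldl_congr_mem _ _ (fun acc _ => acc) 0 ?_).trans
        (PySem.List.foldl_ignore _ _)
      intro acc i hi
      rw [PySem.List.mem_pyRange_one] at hi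
      exact if_neg (by omega)
    · push Not at hnk
      have h1 : (0:Int) ≤ (ts.length : Int) - k := le_of_lt hnk
      have h2 : (ts.length : Int) - k ≤ (ts.length : Int) := by omega
      rw [PySem.List.pyRange_one_append 0 ((ts.length : Int) - k) (ts.length : Int) h1 h2,
        List.foldl_append]
      have htail : ∀ init : Int, List.foldl (fun best i =>
          if 0 ≤ i + k ∧ i + k < (ts.length : Int) then
            max best (PySem.List.pyGetD ts i 0 + PySem.List.pyGetD (sufMaxes ts) (i + k) 0)
          else best) init (PySem.List.pyRange ((ts.length : Int) - k) (ts.length : Int)) = init := by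
        intro init
        refine (PySem.List.foldl_congr_mem _ _ (fun acc _ => acc) init ?_).trans
          (PySem.List.foldl_ignore _ _)
        intro acc i hi
        rw [PySem.List.mem_pyRange_one] at hi
        exact if_neg (by omega)
      rw [htail]
      refine PySem.List.foldl_congr_mem _ _ _ 0 ?_
      intro acc i hi
      rw [PySem.List.mem_pyRange_one] at hi
      rw [if_pos (show i + k < (ts.length : Int) by omega),
        if_pos (show (0:Int) ≤ i + k ∧ i + k < (ts.length : Int) by omega),
        hjval (i + k) (by omega) (by omega)]
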